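-- pv_equiv track=rewrite | github.com/markosolopenko/python | advent_of_code/day_14/reindeer_olympics.py | traveled_after
-- ===== SOURCE A (Python) =====
-- def traveled_after(deer_info, num_seconds):
--     distance = 0
--     total_seconds = 0
--     distances = []
--
--     while True:
--         for i in range(deer_info[2]):
--             total_seconds += 1
--             if total_seconds > num_seconds:
--                 return distance, distances
--             distance += deer_info[1]
--             distances.append(distance)
--
--         for i in range(deer_info[3]):
--             total_seconds += 1
--             if total_seconds > num_seconds:
--                 return distance, distances
--             distances.append(distance)
-- ===== SOURCE B (Python) =====
-- def traveled_after(deer_info, num_seconds):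
--     speed, fly_time, rest_time = deer_info[1], deer_info[2], deer_info[3]
--     distance = 0
--     distances = []
--     for t in range(num_seconds):
--         # flying during the first fly_time seconds of each fly+rest cycle;
--         # non-positive rest means it never needs to rest at all
--         if fly_time > 0 and (rest_time <= 0 or t % (fly_time + rest_time) < fly_time):
--             distance += speed
--         distances.append(distance)
--     return distance, distances
-- ===== Notes on version B (the rewrite author's own statement) =====
-- stated objective: simpler
-- what changed: Replaces the infinite while-True with two nested for-loops and a running total_seconds counter by a single pass over range(num_seconds) that decides 'flying or resting' at each second from its position in the fly+rest cycle (t % cycle < fly_time).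
-- outside the precondition, e.g. on traveled_after([0, 5, 3], -1): A returns (0, []), B raises IndexError; on traveled_after([0, 5, 0, 0], 3): A does not finish within the time limit, B returns (0, [0, 0, 0])
import Mathlib
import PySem

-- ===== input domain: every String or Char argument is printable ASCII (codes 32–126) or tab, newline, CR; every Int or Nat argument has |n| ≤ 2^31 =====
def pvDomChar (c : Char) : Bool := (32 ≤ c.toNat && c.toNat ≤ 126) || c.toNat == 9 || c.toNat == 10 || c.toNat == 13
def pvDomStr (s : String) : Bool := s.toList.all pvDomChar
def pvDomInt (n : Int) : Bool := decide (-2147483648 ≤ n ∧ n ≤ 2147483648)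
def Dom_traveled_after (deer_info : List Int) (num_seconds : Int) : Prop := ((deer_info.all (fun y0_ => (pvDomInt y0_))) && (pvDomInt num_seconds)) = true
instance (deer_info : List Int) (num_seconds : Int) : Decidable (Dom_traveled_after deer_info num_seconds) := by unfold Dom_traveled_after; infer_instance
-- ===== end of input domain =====

-- B replaces A's while-True simulation with two nested for-loops by a single pass over
-- range(num_seconds) deciding flying/resting from the position in the fly+rest cycle (objective: simpler).

-- ===== PORT A =====
-- the inner 'for i in range(deer_info[2])' fly loop; Sum.inr = the function returned
def pvAFly (speed num_seconds : Int) : Nat → Int × Int × List Int → (Int × Int × List Int) ⊕ (Int × List Int)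
  | 0, st => Sum.inl st
  | n+1, (d, ts, ds) =>
      if ts + 1 > num_seconds then Sum.inr (d, ds)
      else pvAFly speed num_seconds n (d + speed, ts + 1, ds ++ [d + speed])

-- the inner 'for i in range(deer_info[3])' rest loop
def pvARest (num_seconds : Int) : Nat → Int × Int × List Int → (Int × Int × List Int) ⊕ (Int × List Int)
  | 0, st => Sum.inl st
  | n+1, (d, ts, ds) =>
      if ts + 1 > num_seconds then Sum.inr (d, ds)
      else pvARest num_seconds n (d, ts + 1, ds ++ [d])

-- the 'while True' loop; the fuel argument only totalizes it (A diverges when both loop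
-- counts are ≤ 0, which Pre_ excludes; inside Pre_ the fuel is never exhausted)
def pvAMain (speed fly rest num_seconds : Int) : Nat → Int × Int × List Int → Int × List Int
  | 0, (d, _, ds) => (d, ds)
  | f+1, st =>
      match pvAFly speed num_seconds fly.toNat st with
      | Sum.inr r => r
      | Sum.inl st' =>
        match pvARest num_seconds rest.toNat st' with
        | Sum.inr r => r
        | Sum.inl st'' => pvAMain speed fly rest num_seconds f st''

def traveled_after (deer_info : List Int) (num_seconds : Int) : Int × List Int :=
  let speed := PySem.List.pyGetD deer_info 1 0
  let fly := PySem.List.pyGetD deer_info 2 0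
  let rest := PySem.List.pyGetD deer_info 3 0
  pvAMain speed fly rest num_seconds (num_seconds.toNat + 1) (0, 0, [])

-- ===== PORT B =====
def traveled_after_alt (deer_info : List Int) (num_seconds : Int) : Int × List Int :=
  let speed := PySem.List.pyGetD deer_info 1 0
  let fly := PySem.List.pyGetD deer_info 2 0
  let rest := PySem.List.pyGetD deer_info 3 0
  (PySem.List.pyRange 0 num_seconds 1).foldl
    (fun (acc : Int × List Int) t =>
      let d := if 0 < fly ∧ (rest ≤ 0 ∨ PySem.Int.mod t (fly + rest) < fly) then acc.1 + speed else acc.1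
      (d, acc.2 ++ [d]))
    (0, [])

-- ===== PRECONDITION & SPEC =====
-- Pre_ excludes lists shorter than 4 (Python A raises IndexError, except for an accidental
-- early return when num_seconds < the available fly seconds) and inputs whose fly and rest
-- times are both ≤ 0, on which A's while-True loop never terminates.
def Pre_traveled_after (deer_info : List Int) (num_seconds : Int) : Prop :=
  4 ≤ deer_info.length ∧ (0 < PySem.List.pyGetD deer_info 2 0 ∨ 0 < PySem.List.pyGetD deer_info 3 0)
instance (deer_info : List Int) (num_seconds : Int) : Decidable (Pre_traveled_after deer_info num_seconds) := by unfold Pre_traveled_after; infer_instance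

def pvWitness_traveled_after : List Int × Int := ([0, 10, 3, 2], 7)

def Spec_traveled_after (deer_info : List Int) (num_seconds : Int) (out : Int × List Int) : Prop := out = traveled_after_alt deer_info num_seconds
instance (deer_info : List Int) (num_seconds : Int) (out : Int × List Int) : Decidable (Spec_traveled_after deer_info num_seconds out) := by unfold Spec_traveled_after; infer_instance

-- ===== CLAIM (what is proved, stated in full; the proofs are below) =====
def Claim_equal_traveled_after : Prop := ∀ (deer_info : List Int) (num_seconds : Int), Dom_traveled_after deer_info num_seconds → Pre_traveled_after deer_info num_seconds → Spec_traveled_after deer_info num_seconds (traveled_after deer_info num_seconds)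

-- ===== LEMMAS AND PROOFS =====

-- reference second-by-second simulation: c n says whether second n (0-based) is flying
def pvF (speed : Int) (c : Nat → Bool) : Nat → Int × List Int
  | 0 => (0, [])
  | n+1 =>
    let p := pvF speed c n
    let d := if c n then p.1 + speed else p.1
    (d, p.2 ++ [d])

lemma pvF_congr (speed : Int) (c₁ c₂ : Nat → Bool) (h : ∀ t, c₁ t = c₂ t) :
    ∀ n, pvF speed c₁ n = pvF speed c₂ n := by
  intro n
  induction n with
  | zero => rfl
  | succ n ih => simp [pvF, ih, h n]

-- A's flying condition, as a function of the (0-based) second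
def pvCA (fly rest : Int) (t : Nat) : Bool := decide (t % (fly.toNat + rest.toNat) < fly.toNat)

-- B's flying condition coincides with A's
lemma pvCond_eq (fly rest : Int) (t : Nat) :
    (decide (0 < fly ∧ (rest ≤ 0 ∨ PySem.Int.mod (t : Int) (fly + rest) < fly))) = pvCA fly rest t := by
  unfold pvCA
  by_cases hf : 0 < fly
  · by_cases hr : 0 < rest
    · have hfr' : (0:Int) < fly + rest := by omega
      rw [PySem.Int.mod_eq_emod_of_pos hfr']
      have h1 : fly + rest = ((fly.toNat + rest.toNat : Nat) : Int) := by omega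
      have h2 : (t:Int) % ((fly.toNat + rest.toNat : Nat):Int) = ((t % (fly.toNat + rest.toNat) : Nat) : Int) := by
        exact_mod_cast rfl
      rw [h1, h2]
      simp [hf, hr]
    · have hc : 0 < fly.toNat + rest.toNat := by omega
      have : t % (fly.toNat + rest.toNat) < fly.toNat := by
        have := Nat.mod_lt t hc
        have hr0 : rest.toNat = 0 := by omega
        omega
      simp [hf, this]
      omega
  · have hf0 : fly.toNat = 0 := by omega
    simp [hf, hf0]

-- the fly loop, run from a state that agrees with pvF at second j, when every second of
-- the window is flying
lemma pvAFly_run (speed ns : Int) (c : Nat → Bool) :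
    ∀ (m j : Nat), j ≤ ns.toNat → (∀ t, j ≤ t → t < j + m → c t = true) →
    pvAFly speed ns m ((pvF speed c j).1, (j : Int), (pvF speed c j).2) =
      if j + m ≤ ns.toNat then
        Sum.inl ((pvF speed c (j+m)).1, ((j+m : Nat) : Int), (pvF speed c (j+m)).2)
      else Sum.inr (pvF speed c ns.toNat) := by
  intro m
  induction m with
  | zero =>
    intro j hj _
    simp [pvAFly, hj]
  | succ m ih =>
    intro j hj hc
    by_cases hend : (j : Int) + 1 > ns
    · have hjn : j = ns.toNat := by omega
      have hno : ¬ (j + (m+1) ≤ ns.toNat) := by omega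
      simp [pvAFly, hjn]
    · have hjlt : j + 1 ≤ ns.toNat := by omega
      have hcj : c j = true := hc j (le_refl _) (by omega)
      have hstep : pvF speed c (j+1) = ((pvF speed c j).1 + speed, (pvF speed c j).2 ++ [(pvF speed c j).1 + speed]) := by
        simp [pvF, hcj]
      have hih := ih (j+1) hjlt (fun t ht1 ht2 => hc t (by omega) (by omega))
      rw [hstep] at hih
      simp only [pvAFly, hend] at *
      rw [show ((j:Int) + 1) = ((j+1 : Nat) : Int) by push_cast; ring]
      rw [hih]
      have harr : j + 1 + m = j + (m + 1) := by omega
      simp [harr]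

-- the rest loop likewise, when every second of the window is resting
lemma pvARest_run (ns : Int) (speed : Int) (c : Nat → Bool) :
    ∀ (m j : Nat), j ≤ ns.toNat → (∀ t, j ≤ t → t < j + m → c t = false) →
    pvARest ns m ((pvF speed c j).1, (j : Int), (pvF speed c j).2) =
      if j + m ≤ ns.toNat then
        Sum.inl ((pvF speed c (j+m)).1, ((j+m : Nat) : Int), (pvF speed c (j+m)).2)
      else Sum.inr (pvF speed c ns.toNat) := by
  intro m
  induction m with
  | zero =>
    intro j hj _
    simp [pvARest, hj]
  | succ m ih =>
    intro j hj hc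
    by_cases hend : (j : Int) + 1 > ns
    · have hjn : j = ns.toNat := by omega
      have hno : ¬ (j + (m+1) ≤ ns.toNat) := by omega
      simp [pvARest, hjn]
    · have hjlt : j + 1 ≤ ns.toNat := by omega
      have hcj : c j = false := hc j (le_refl _) (by omega)
      have hstep : pvF speed c (j+1) = ((pvF speed c j).1, (pvF speed c j).2 ++ [(pvF speed c j).1]) := by
        simp [pvF, hcj]
      have hih := ih (j+1) hjlt (fun t ht1 ht2 => hc t (by omega) (by omega))
      rw [hstep] at hih
      simp only [pvARest, hend] at *
      rw [show ((j:Int) + 1) = ((j+1 : Nat) : Int) by push_cast; ring]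
      rw [hih]
      have harr : j + 1 + m = j + (m + 1) := by omega
      simp [harr]

lemma pvCA_fly (fly rest : Int) (k r : Nat) (hr : r < fly.toNat) :
    pvCA fly rest (k * (fly.toNat + rest.toNat) + r) = true := by
  unfold pvCA
  have h1 : (k * (fly.toNat + rest.toNat) + r) % (fly.toNat + rest.toNat) = r := by
    rw [Nat.add_comm, Nat.add_mul_mod_self_right]
    exact Nat.mod_eq_of_lt (by omega)
  simp [h1, hr]

lemma pvCA_rest (fly rest : Int) (k r : Nat) (hr1 : fly.toNat ≤ r) (hr2 : r < fly.toNat + rest.toNat) :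
    pvCA fly rest (k * (fly.toNat + rest.toNat) + r) = false := by
  unfold pvCA
  have h1 : (k * (fly.toNat + rest.toNat) + r) % (fly.toNat + rest.toNat) = r := by
    rw [Nat.add_comm, Nat.add_mul_mod_self_right]
    exact Nat.mod_eq_of_lt (by omega)
  simp [h1]
  omega

-- the while-True loop, from the start of cycle k, agrees with pvF at the end
lemma pvAMain_run (speed fly rest ns : Int) :
    ∀ (fuel k : Nat), k * (fly.toNat + rest.toNat) ≤ ns.toNat →
      ns.toNat < k * (fly.toNat + rest.toNat) + fuel * (fly.toNat + rest.toNat) →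
    pvAMain speed fly rest ns fuel
        ((pvF speed (pvCA fly rest) (k * (fly.toNat + rest.toNat))).1,
         ((k * (fly.toNat + rest.toNat) : Nat) : Int),
         (pvF speed (pvCA fly rest) (k * (fly.toNat + rest.toNat))).2) =
      pvF speed (pvCA fly rest) ns.toNat := by
  intro fuel
  induction fuel with
  | zero => intro k h1 h2; omega
  | succ f ih =>
    intro k h1 h2
    set C := fly.toNat + rest.toNat with hC
    set j := k * C with hjdef
    have hfly := pvAFly_run speed ns (pvCA fly rest) fly.toNat j h1
      (fun t ht1 ht2 => by
        have heq : t = j + (t - j) := by omega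
        rw [heq]
        exact pvCA_fly fly rest k (t - j) (by omega))
    by_cases hcase1 : j + fly.toNat ≤ ns.toNat
    · rw [if_pos hcase1] at hfly
      have hrest := pvARest_run ns speed (pvCA fly rest) rest.toNat (j + fly.toNat) hcase1
        (fun t ht1 ht2 => by
          have heq : t = j + (t - j) := by omega
          rw [heq]
          exact pvCA_rest fly rest k (t - j) (by omega) (by omega))
      by_cases hcase2 : j + fly.toNat + rest.toNat ≤ ns.toNat
      · rw [if_pos (by omega : j + fly.toNat + rest.toNat ≤ ns.toNat)] at hrest
        have hih := ih (k+1) (by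
            have : (k+1) * C = j + fly.toNat + rest.toNat := by rw [hjdef, hC]; ring
            omega)
          (by
            have : (k+1) * C + f * C = k * C + (f+1) * C := by ring
            omega)
        have hsucc : (k+1) * C = j + fly.toNat + rest.toNat := by
          simp only [hjdef, hC]; ring
        rw [hsucc] at hih
        simp only [pvAMain, hfly, hrest]
        exact hih
      · rw [if_neg (by omega)] at hrest
        simp only [pvAMain, hfly, hrest]
    · rw [if_neg hcase1] at hfly
      simp only [pvAMain, hfly]

-- B's fold over range(n) is the same second-by-second simulation
lemma pvFoldB (speed : Int) (cb : Int → Prop) [DecidablePred cb] :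
    ∀ n : Nat, (PySem.List.pyRange 0 (n : Int) 1).foldl
      (fun (acc : Int × List Int) t =>
        let d := if cb t then acc.1 + speed else acc.1
        (d, acc.2 ++ [d])) (0, []) = pvF speed (fun t => decide (cb (t : Int))) n := by
  intro n
  induction n with
  | zero => simp [PySem.List.pyRange_one_eq_nil, pvF]
  | succ n ih =>
    rw [show ((n+1 : Nat) : Int) = (n : Int) + 1 by push_cast; ring,
        PySem.List.pyRange_one_succ_right (by positivity)]
    rw [List.foldl_append, ih]
    simp [pvF]

lemma pvB_eq (deer_info : List Int) (ns : Int) :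
    traveled_after_alt deer_info ns =
      pvF (PySem.List.pyGetD deer_info 1 0)
        (fun t => decide (0 < PySem.List.pyGetD deer_info 2 0 ∧
          (PySem.List.pyGetD deer_info 3 0 ≤ 0 ∨
            PySem.Int.mod (t : Int) (PySem.List.pyGetD deer_info 2 0 + PySem.List.pyGetD deer_info 3 0) < PySem.List.pyGetD deer_info 2 0)))
        ns.toNat := by
  unfold traveled_after_alt
  by_cases hns : ns ≤ 0
  · rw [PySem.List.pyRange_one_eq_nil (by omega)]
    have : ns.toNat = 0 := by omega
    simp [this, pvF]
  · rw [show ns = ((ns.toNat : Nat) : Int) by omega]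
    exact pvFoldB _ _ ns.toNat

-- ===== VERDICT (by name: the statement is the Claim_ definition above) =====
theorem traveled_after_spec : Claim_equal_traveled_after := by
  intro deer_info ns _ hpre
  unfold Spec_traveled_after
  obtain ⟨-, hfr⟩ := hpre
  set speed := PySem.List.pyGetD deer_info 1 0
  set fly := PySem.List.pyGetD deer_info 2 0
  set rest := PySem.List.pyGetD deer_info 3 0
  have hC : 0 < fly.toNat + rest.toNat := by omega
  rw [pvB_eq]
  show pvAMain speed fly rest ns (ns.toNat + 1) (0, 0, []) = _
  have h0 : ((0 : Int), (0 : Int), ([] : List Int)) =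
      ((pvF speed (pvCA fly rest) (0 * (fly.toNat + rest.toNat))).1,
       ((0 * (fly.toNat + rest.toNat) : Nat) : Int),
       (pvF speed (pvCA fly rest) (0 * (fly.toNat + rest.toNat))).2) := by
    simp [pvF]
  rw [h0]
  rw [pvAMain_run speed fly rest ns (ns.toNat + 1) 0 (by omega)
    (by
      have : ns.toNat + 1 ≤ (ns.toNat + 1) * (fly.toNat + rest.toNat) := by
        calc ns.toNat + 1 = (ns.toNat + 1) * 1 := by ring
          _ ≤ (ns.toNat + 1) * (fly.toNat + rest.toNat) := Nat.mul_le_mul_left _ hC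
      omega)]
  exact (pvF_congr speed _ _ (fun t => pvCond_eq fly rest t) ns.toNat).symm
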